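-- pv_equiv track=rewrite | github.com/yoka255/ProjectEuler | 800-899/881.py | calc_val
-- ===== SOURCE A (Python) =====
-- from typing import Tuple
--
-- primes = [2, 3, 5, 7, 11, 13, 17, 19, 23, 29, 31, 37, 41, 43]
--
-- def calc_val(tup: Tuple) -> int:
--     i = 0
--     res = 1
--     for j, cnt in enumerate(tup[::-1]):
--         for _ in range(cnt):
--             res *= pow(primes[i], len(tup) - j)
--             i += 1
--     return res
-- ===== SOURCE B (Python) =====
-- primes = [2, 3, 5, 7, 11, 13, 17, 19, 23, 29, 31, 37, 41, 43]
--
-- def calc_val(tup) -> int: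
--     # conjugate-partition identity: the exponents over the consumed primes are
--     # non-increasing, so prod(p_i ** e_i) = prod over levels t of
--     # (product of the first m_t primes), m_t = number of primes with exponent >= t.
--     # m_t is the positive-count suffix sum of tup from index t-1, so: precompute
--     # prefix products of primes once, then one multiplication per input element,
--     # in original order, with no exponentiation and no reversal.
--     pref = [1]
--     for p in primes:
--         pref.append(pref[-1] * p)
--     m = sum(c for c in tup if c > 0)
--     res = 1
--     for c in tup:
--         res *= pref[m]
--         m -= max(c, 0)
--     return res
-- ===== Notes on version B (the rewrite author's own statement) =====
-- stated objective: alternative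
-- what changed: B replaces A's reversed walk with a running prime index and a pow-and-multiply per consumed prime by the conjugate-partition identity: since the exponents over the consumed primes are non-increasing, the result equals a product of prefix products of primes, one per input element, taken at the positive suffix sums; B precomputes the 15 prefix products once and does one table lookup and one multiplication per element, in original order, with no exponentiation and no reversal; Pre_ excludes inputs whose total positive count exceeds len(primes)=14, on which both programs raise IndexError.
import Mathlib
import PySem

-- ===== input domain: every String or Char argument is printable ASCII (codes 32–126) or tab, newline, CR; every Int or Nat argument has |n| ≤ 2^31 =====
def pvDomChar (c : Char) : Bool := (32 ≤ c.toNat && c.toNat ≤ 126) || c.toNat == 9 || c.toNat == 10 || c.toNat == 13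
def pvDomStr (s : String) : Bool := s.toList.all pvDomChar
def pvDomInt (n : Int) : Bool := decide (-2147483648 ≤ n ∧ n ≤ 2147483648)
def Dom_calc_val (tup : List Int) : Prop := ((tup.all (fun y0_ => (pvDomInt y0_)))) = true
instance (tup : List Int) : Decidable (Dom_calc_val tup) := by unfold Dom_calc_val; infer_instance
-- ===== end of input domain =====

-- B computes the same product by the conjugate-partition identity (product of prefix products of primes at the positive suffix sums, original order, no exponentiation) instead of A's reversed walk with a running prime index and a pow per consumed prime (alternative algorithm, similar cost).


-- ===== PORT A =====
def pvPrimes : List Int := [2, 3, 5, 7, 11, 13, 17, 19, 23, 29, 31, 37, 41, 43]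

-- tup[::-1] is List.reverse; primes[i] is pyGet? (none = IndexError, excluded by Pre_,
-- so the .getD 0 default is never taken inside Pre_); the exponent len(tup)-j is ≥ 1, so .toNat is exact.
def calc_val (tup : List Int) : Int :=
  let n : Int := (tup.length : Int)
  ((PySem.List.enumerate tup.reverse 0).foldl
    (fun (st : Int × Int) jc =>
      (PySem.List.pyRange 0 jc.2 1).foldl
        (fun (st2 : Int × Int) _ =>
          (st2.1 + 1, st2.2 * ((PySem.List.pyGet? pvPrimes st2.1).getD 0) ^ (n - jc.1).toNat))
        st)
    (0, 1)).2

-- ===== PORT B =====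
-- pref[-1] is pyGet? acc (-1); pref[m] is pyGet? pref m (none = IndexError, excluded by Pre_,
-- so the .getD 0 defaults are never taken inside Pre_); sum(c for c in tup if c > 0) is a foldl with the filter.
def calc_val_alt (tup : List Int) : Int :=
  let pref : List Int :=
    pvPrimes.foldl (fun acc p => acc ++ [((PySem.List.pyGet? acc (-1)).getD 0) * p]) [1]
  let m0 : Int := tup.foldl (fun s c => if c > 0 then s + c else s) 0
  (tup.foldl
    (fun (st : Int × Int) c =>
      (st.1 * (PySem.List.pyGet? pref st.2).getD 0, st.2 - max c 0))
    (1, m0)).1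

-- ===== PRECONDITION & SPEC =====
-- Pre_ excludes inputs whose total positive count exceeds len(primes) = 14: there both programs raise IndexError.
def Pre_calc_val (tup : List Int) : Prop := (tup.map Int.toNat).sum ≤ 14
instance (tup : List Int) : Decidable (Pre_calc_val tup) := by unfold Pre_calc_val; infer_instance
def pvWitness_calc_val : List Int := [2, 1, 0]

def Spec_calc_val (tup : List Int) (out : Int) : Prop := out = calc_val_alt tup
instance (tup : List Int) (out : Int) : Decidable (Spec_calc_val tup out) := by unfold Spec_calc_val; infer_instance

-- ===== CLAIM (what is proved, stated in full; the proofs are below) =====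
def Claim_equal_calc_val : Prop := ∀ (tup : List Int), Dom_calc_val tup → Pre_calc_val tup → Spec_calc_val tup (calc_val tup)

-- ===== LEMMAS AND PROOFS =====

-- prefix product of the first m primes (B's pref table entry)
def pvP (m : Int) : Int := (pvPrimes.take m.toNat).prod

-- the literal pref table B builds
def pvPref : List Int :=
  [1, 2, 6, 30, 210, 2310, 30030, 510510, 9699690, 223092870, 6469693230,
   200560490130, 7420738134810, 304250263527210, 13082761331670030]

theorem pvPref_build :
    pvPrimes.foldl (fun acc p => acc ++ [((PySem.List.pyGet? acc (-1)).getD 0) * p]) [1] = pvPref := by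
  decide

theorem pvPref_get (m : Int) (h0 : 0 ≤ m) (h14 : m ≤ 14) :
    (PySem.List.pyGet? pvPref m).getD 0 = pvP m := by
  obtain ⟨k, rfl⟩ : ∃ k : Nat, m = (k : Int) := ⟨m.toNat, (Int.toNat_of_nonneg h0).symm⟩
  have hk : k < 15 := by omega
  have : ∀ j : Nat, j < 15 → (pvPref[j]?).getD 0 = (pvPrimes.take j).prod := by decide
  rw [PySem.List.pyGet?_natCast]
  simpa [pvP] using this k hk

-- A's value as a recursion over the reversed positive counts (exponent = remaining length)
def pvA : List Nat → Nat → Int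
  | [], _ => 1
  | c :: r, m => ((pvPrimes.drop m).take c).prod ^ (r.length + 1) * pvA r (m + c)

-- B's value as a recursion over the positive counts in original order
def pvB : List Nat → Int → Int
  | [], _ => 1
  | c :: r, m => pvP m * pvB r (m - (c : Int))

theorem pvP_add (m c : Nat) :
    pvP ((m : Int) + (c : Int)) = pvP (m : Int) * ((pvPrimes.drop m).take c).prod := by
  have : ((m : Int) + (c : Int)).toNat = m + c := by omega
  simp [pvP, this, List.take_add]

theorem pvB_append (xs : List Nat) (c : Nat) :
    ∀ m : Int, pvB (xs ++ [c]) m = pvB xs m * pvP (m - (xs.sum : Int)) := by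
  induction xs with
  | nil => intro m; simp [pvB]
  | cons x r ih =>
      intro m
      simp only [List.cons_append, pvB, ih (m - (x : Int)), List.sum_cons]
      rw [show m - (x : Int) - (r.sum : Int) = m - ((x + r.sum : Nat) : Int) from by push_cast; ring]
      ring

-- the conjugate-partition bridge: A's group-power form equals B's prefix-product form
theorem pv_bridge (l : List Nat) :
    ∀ m : Nat, pvP (m : Int) ^ l.length * pvA l m = pvB l.reverse ((m : Int) + (l.sum : Int)) := by
  induction l with
  | nil => intro m; simp [pvA, pvB]
  | cons c r ih =>
      intro m
      have hP : pvP ((m + c : Nat) : Int) = pvP (m : Int) * ((pvPrimes.drop m).take c).prod := by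
        push_cast; exact pvP_add m c
      calc pvP (m : Int) ^ (c :: r).length * pvA (c :: r) m
          = (pvP (m : Int) * ((pvPrimes.drop m).take c).prod) ^ (r.length + 1) * pvA r (m + c) := by
            simp only [pvA, List.length_cons]; ring
        _ = pvP ((m + c : Nat) : Int) * (pvP ((m + c : Nat) : Int) ^ r.length * pvA r (m + c)) := by
            rw [hP]; ring
        _ = pvP ((m + c : Nat) : Int) * pvB r.reverse (((m + c : Nat) : Int) + (r.sum : Int)) := by
            rw [ih (m + c)]
        _ = pvB (c :: r).reverse ((m : Int) + ((c :: r).sum : Int)) := by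
            simp only [List.reverse_cons, List.sum_cons]
            rw [pvB_append, List.sum_reverse]
            rw [show ((m : Int) + ((c + r.sum : Nat) : Int)) - (r.sum : Int)
                  = ((m + c : Nat) : Int) from by push_cast; ring,
                show ((m : Int) + ((c + r.sum : Nat) : Int))
                  = ((m + c : Nat) : Int) + (r.sum : Int) from by push_cast; ring]
            ring

-- ignore-the-element folds are function iteration
theorem pv_foldl_ignore {σ α : Type} (f : σ → σ) :
    ∀ (l : List α) (st : σ), l.foldl (fun s _ => f s) st = f^[l.length] st := by
  intro l
  induction l with
  | nil => intro st; rfl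
  | cons x xs ih =>
      intro st
      simp [List.foldl_cons, ih, Function.iterate_succ_apply]

-- A's inner per-prime step, with the exponent fixed
def pvStepA (e : Nat) (st : Int × Int) : Int × Int :=
  (st.1 + 1, st.2 * ((PySem.List.pyGet? pvPrimes st.1).getD 0) ^ e)

theorem pv_innerA (e : Nat) :
    ∀ (k m : Nat) (res : Int), m + k ≤ 14 →
      (pvStepA e)^[k] ((m : Int), res)
        = (((m + k : Nat) : Int), res * ((pvPrimes.drop m).take k).prod ^ e) := by
  intro k
  induction k with
  | zero => intro m res _; simp
  | succ k ih =>
      intro m res h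
      have hm : m < pvPrimes.length := by simp [pvPrimes]; omega
      have hget : PySem.List.pyGet? pvPrimes ((m : Nat) : Int) = some pvPrimes[m] := by
        simp [PySem.List.pyGet?_natCast, List.getElem?_eq_getElem hm]
      have hstep : pvStepA e ((m : Int), res) = (((m + 1 : Nat) : Int), res * pvPrimes[m] ^ e) := by
        simp [pvStepA, hget]
      have hdrop : pvPrimes.drop m = pvPrimes[m] :: pvPrimes.drop (m + 1) :=
        (List.getElem_cons_drop hm).symm
      have htake : (pvPrimes.drop m).take (k + 1)
          = pvPrimes[m] :: (pvPrimes.drop (m + 1)).take k := by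
        rw [hdrop, List.take_succ_cons]
      rw [Function.iterate_succ_apply, hstep, ih (m + 1) _ (by omega), htake,
        List.prod_cons, mul_pow, Prod.mk.injEq]
      refine ⟨by push_cast; ring, by ring⟩

-- A's outer fold computes pvA over the positive counts
theorem pv_foldA (n : Int) :
    ∀ (cs : List Int) (j : Int) (m : Nat) (res : Int),
      n - j = (cs.length : Int) → m + (cs.map Int.toNat).sum ≤ 14 →
      (PySem.List.enumerate cs j).foldl
        (fun (st : Int × Int) jc =>
          (PySem.List.pyRange 0 jc.2 1).foldl
            (fun (st2 : Int × Int) _ =>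
              (st2.1 + 1, st2.2 * ((PySem.List.pyGet? pvPrimes st2.1).getD 0) ^ (n - jc.1).toNat))
            st)
        ((m : Int), res)
      = (((m + (cs.map Int.toNat).sum : Nat) : Int), res * pvA (cs.map Int.toNat) m) := by
  intro cs
  induction cs with
  | nil => intro j m res _ _; simp [PySem.List.enumerate, pvA]
  | cons c rest ih =>
      intro j m res hlen h
      set k : Nat := c.toNat with hk
      have hbound : m + k ≤ 14 := by
        simp only [List.map_cons, List.sum_cons, ← hk] at h; omega
      have hrlen : (PySem.List.pyRange 0 c 1).length = k := by
        simp [PySem.List.length_pyRange_one, hk]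
      have he : (n - j).toNat = (rest.map Int.toNat).length + 1 := by
        simp only [List.length_cons, List.length_map] at hlen ⊢
        omega
      have hInner :
          (PySem.List.pyRange 0 c 1).foldl
            (fun (st2 : Int × Int) _ =>
              (st2.1 + 1, st2.2 * ((PySem.List.pyGet? pvPrimes st2.1).getD 0) ^ (n - j).toNat))
            ((m : Int), res)
          = (((m + k : Nat) : Int),
              res * ((pvPrimes.drop m).take k).prod ^ (n - j).toNat) := by
        rw [show (fun (st2 : Int × Int) (_ : Int) =>
              (st2.1 + 1, st2.2 * ((PySem.List.pyGet? pvPrimes st2.1).getD 0) ^ (n - j).toNat))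
            = (fun (s : Int × Int) (_ : Int) => pvStepA (n - j).toNat s) from rfl]
        rw [pv_foldl_ignore (pvStepA (n - j).toNat) (PySem.List.pyRange 0 c 1), hrlen]
        exact pv_innerA (n - j).toNat k m res hbound
      have hlen' : n - (j + 1) = (rest.length : Int) := by
        simp only [List.length_cons] at hlen; push_cast at hlen ⊢; omega
      have hbound' : (m + k) + (rest.map Int.toNat).sum ≤ 14 := by
        simp only [List.map_cons, List.sum_cons, ← hk] at h; omega
      rw [PySem.List.enumerate_cons, List.foldl_cons]
      simp only
      rw [hInner, ih (j + 1) (m + k) _ hlen' hbound']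
      simp only [List.map_cons, List.sum_cons, ← hk, pvA, he]
      rw [show m + (k + (rest.map Int.toNat).sum) = (m + k) + (rest.map Int.toNat).sum from by omega]
      refine Prod.ext rfl ?_
      simp only
      ring

-- the positive-sum loop of B
theorem pv_possum (tup : List Int) :
    ∀ s : Int, tup.foldl (fun s c => if c > 0 then s + c else s) s
      = s + ((tup.map Int.toNat).sum : Int) := by
  induction tup with
  | nil => intro s; simp
  | cons c rest ih =>
      intro s
      simp only [List.foldl_cons, List.map_cons, List.sum_cons, ih]
      split_ifs with h
      · push_cast; omega
      · push_cast; omega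

-- B's outer fold computes pvB
theorem pv_foldB :
    ∀ (tup : List Int) (res m : Int),
      ((tup.map Int.toNat).sum : Int) ≤ m → m ≤ 14 →
      tup.foldl
        (fun (st : Int × Int) c =>
          (st.1 * (PySem.List.pyGet? pvPref st.2).getD 0, st.2 - max c 0))
        (res, m)
      = (res * pvB (tup.map Int.toNat) m, m - ((tup.map Int.toNat).sum : Int)) := by
  intro tup
  induction tup with
  | nil => intro res m _ _; simp [pvB]
  | cons c rest ih =>
      intro res m hlo hhi
      have h0 : (0 : Int) ≤ m := le_trans (by positivity) hlo
      have hmax : max c 0 = ((c.toNat : Nat) : Int) := by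
        rw [Int.toNat_eq_max]
      have hsum : ((c.toNat : Nat) : Int) + ((rest.map Int.toNat).sum : Int) ≤ m := by
        simp only [List.map_cons, List.sum_cons] at hlo; push_cast at hlo ⊢; omega
      have hlo' : ((rest.map Int.toNat).sum : Int) ≤ m - max c 0 := by
        rw [hmax]; omega
      have hhi' : m - max c 0 ≤ 14 := by
        have : (0 : Int) ≤ max c 0 := le_max_right c 0
        omega
      simp only [List.foldl_cons]
      rw [ih (res * (PySem.List.pyGet? pvPref m).getD 0) (m - max c 0) hlo' hhi',
        pvPref_get m h0 hhi]
      simp only [List.map_cons, List.sum_cons, pvB, hmax]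
      refine Prod.ext ?_ ?_
      · simp only; ring
      · simp only; push_cast; ring

-- ===== VERDICT (by name: the statement is the Claim_ definition above) =====
theorem calc_val_spec : Claim_equal_calc_val := by
  intro tup _ hpre
  have hS : (tup.map Int.toNat).sum ≤ 14 := hpre
  have hrevsum : (tup.reverse.map Int.toNat).sum = (tup.map Int.toNat).sum := by
    rw [List.map_reverse, List.sum_reverse]
  -- A's side
  have hA : calc_val tup = pvA (tup.reverse.map Int.toNat) 0 := by
    unfold calc_val
    dsimp only
    have h := pv_foldA (tup.length : Int) tup.reverse 0 0 1
      (by simp) (by rw [hrevsum]; simpa using hS)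
    simp only [Nat.cast_zero, one_mul] at h
    rw [h]
  -- B's side
  have hB : calc_val_alt tup
      = pvB (tup.map Int.toNat) (((tup.map Int.toNat).sum : Nat) : Int) := by
    unfold calc_val_alt
    dsimp only
    rw [pvPref_build, pv_possum tup 0, zero_add]
    rw [pv_foldB tup 1 (((tup.map Int.toNat).sum : Nat) : Int) (le_refl _) (by exact_mod_cast hS)]
    simp
  -- the bridge at m = 0
  have hbr := pv_bridge (tup.reverse.map Int.toNat) 0
  rw [show (tup.reverse.map Int.toNat).reverse = tup.map Int.toNat from by
        rw [List.map_reverse, List.reverse_reverse],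
      hrevsum] at hbr
  have hP0 : pvP ((0 : Nat) : Int) = 1 := by simp [pvP]
  rw [hP0, one_pow, one_mul] at hbr
  unfold Spec_calc_val
  rw [hA, hB, hbr]
  norm_num
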